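-- pv_equiv track=rewrite | github.com/sfu-discourse-lab/GenderGapTracker | NLP/main/entity_gender_annotator.py | measure_voices
-- ===== SOURCE A (Python) =====
-- def measure_voices(people_genders, nes_quotes, quotes_no_nes):
--     voice_females = 0
--     voice_males = 0
--     voice_unknowns = 0
--
--     for person, quotes in zip(nes_quotes.keys(), nes_quotes.values()):
--         gender = people_genders[person]
--
--         sum_of_quote_lengths = 0
--         for q in quotes:
--             sum_of_quote_lengths += q['quote_token_count']
--
--         if gender == 'female':
--             voice_females += sum_of_quote_lengths
--         elif gender == 'male':
--             voice_males += sum_of_quote_lengths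
--         else:
--             voice_unknowns += sum_of_quote_lengths
--
--     return voice_females, voice_males, voice_unknowns
-- ===== SOURCE B (Python) =====
-- def measure_voices(people_genders, nes_quotes, quotes_no_nes):
--     # Staged passes instead of one branching loop: sum the female and male
--     # voices by filtered comprehensions, then get unknowns as grand total
--     # minus the two named groups (correct since the three groups partition
--     # all quotes).
--     items = list(nes_quotes.items())
--
--     def size(quotes):
--         return sum(q['quote_token_count'] for q in quotes)
--
--     voice_females = sum(size(qs) for p, qs in items if people_genders[p] == 'female')
--     voice_males = sum(size(qs) for p, qs in items if people_genders[p] == 'male')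
--     total = sum(size(qs) for p, qs in items)
--     return voice_females, voice_males, total - voice_females - voice_males
-- ===== Notes on version B (the rewrite author's own statement) =====
-- stated objective: alternative
-- what changed: Replaces the single accumulator loop with if/elif/else by three staged filtered-sum passes (female sum, male sum, grand total) and computes the unknown total by subtraction instead of accumulating it.
import Mathlib
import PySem

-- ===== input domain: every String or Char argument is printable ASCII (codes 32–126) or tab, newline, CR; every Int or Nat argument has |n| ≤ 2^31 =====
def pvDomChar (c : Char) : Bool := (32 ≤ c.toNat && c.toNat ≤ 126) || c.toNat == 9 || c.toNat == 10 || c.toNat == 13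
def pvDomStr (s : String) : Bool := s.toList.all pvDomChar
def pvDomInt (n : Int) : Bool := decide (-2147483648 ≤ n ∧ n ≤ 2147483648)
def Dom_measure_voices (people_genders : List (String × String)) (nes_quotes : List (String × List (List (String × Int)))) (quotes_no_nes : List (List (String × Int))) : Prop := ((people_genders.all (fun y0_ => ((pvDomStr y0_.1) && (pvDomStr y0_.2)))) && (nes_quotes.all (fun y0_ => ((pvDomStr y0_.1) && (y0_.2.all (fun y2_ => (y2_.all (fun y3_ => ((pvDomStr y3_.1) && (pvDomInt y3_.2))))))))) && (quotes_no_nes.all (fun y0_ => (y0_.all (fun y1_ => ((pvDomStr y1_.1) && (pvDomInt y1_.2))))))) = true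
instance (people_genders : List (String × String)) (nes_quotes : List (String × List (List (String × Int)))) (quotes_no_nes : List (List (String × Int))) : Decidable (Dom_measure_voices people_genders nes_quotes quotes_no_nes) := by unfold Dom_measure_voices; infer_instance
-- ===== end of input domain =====

-- B replaces A's single branching accumulator loop by three staged filtered-sum
-- passes (female, male, grand total) with unknowns obtained by subtraction
-- (alternative decomposition, same cost).


-- ===== PORT A =====
-- three counters; per person: look up gender, accumulate quote lengths in a loop, branch
def measure_voices (people_genders : List (String × String)) (nes_quotes : List (String × List (List (String × Int)))) (quotes_no_nes : List (List (String × Int))) : Int × Int × Int :=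
  nes_quotes.foldl (fun (s : Int × Int × Int) pq =>
    let gender := ((PySem.Dict.mk people_genders).get? pq.1).getD ""   -- KeyError excluded by Pre_
    let sum_of_quote_lengths :=
      pq.2.foldl (fun acc q => acc + ((PySem.Dict.mk q).get? "quote_token_count").getD 0) 0
    if gender = "female" then (s.1 + sum_of_quote_lengths, s.2.1, s.2.2)
    else if gender = "male" then (s.1, s.2.1 + sum_of_quote_lengths, s.2.2)
    else (s.1, s.2.1, s.2.2 + sum_of_quote_lengths)) (0, 0, 0)

-- ===== PORT B =====
-- staged filtered sums; unknowns by subtraction from the grand total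
def mvSize (quotes : List (List (String × Int))) : Int :=
  (quotes.map (fun q => ((PySem.Dict.mk q).get? "quote_token_count").getD 0)).sum

def measure_voices_alt (people_genders : List (String × String)) (nes_quotes : List (String × List (List (String × Int)))) (quotes_no_nes : List (List (String × Int))) : Int × Int × Int :=
  let gender := fun p => ((PySem.Dict.mk people_genders).get? p).getD ""   -- KeyError excluded by Pre_
  let voice_females := ((nes_quotes.filter (fun pq => gender pq.1 == "female")).map (fun pq => mvSize pq.2)).sum
  let voice_males := ((nes_quotes.filter (fun pq => gender pq.1 == "male")).map (fun pq => mvSize pq.2)).sum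
  let total := (nes_quotes.map (fun pq => mvSize pq.2)).sum
  (voice_females, voice_males, total - voice_females - voice_males)

-- ===== PRECONDITION & SPEC =====
-- Pre_ excludes exactly the inputs on which Python A raises KeyError: a speaker absent
-- from people_genders, or a quote dict without the key 'quote_token_count'.
def Pre_measure_voices (people_genders : List (String × String)) (nes_quotes : List (String × List (List (String × Int)))) (quotes_no_nes : List (List (String × Int))) : Prop :=
  ∀ pq ∈ nes_quotes, ((PySem.Dict.mk people_genders).get? pq.1).isSome = true ∧
    ∀ q ∈ pq.2, ((PySem.Dict.mk q).get? "quote_token_count").isSome = true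
instance (people_genders : List (String × String)) (nes_quotes : List (String × List (List (String × Int)))) (quotes_no_nes : List (List (String × Int))) : Decidable (Pre_measure_voices people_genders nes_quotes quotes_no_nes) := by unfold Pre_measure_voices; infer_instance
def pvWitness_measure_voices : (List (String × String)) × (List (String × List (List (String × Int)))) × (List (List (String × Int))) :=
  ([("alice", "female"), ("bob", "male")],
   [("alice", [[("quote_token_count", 3)], [("quote_token_count", 2)]]), ("bob", [[("quote_token_count", 5)]])],
   [])
def Spec_measure_voices (people_genders : List (String × String)) (nes_quotes : List (String × List (List (String × Int)))) (quotes_no_nes : List (List (String × Int))) (out : Int × Int × Int) : Prop := out = measure_voices_alt people_genders nes_quotes quotes_no_nes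
instance (people_genders : List (String × String)) (nes_quotes : List (String × List (List (String × Int)))) (quotes_no_nes : List (List (String × Int))) (out : Int × Int × Int) : Decidable (Spec_measure_voices people_genders nes_quotes quotes_no_nes out) := by unfold Spec_measure_voices; infer_instance

-- ===== CLAIM (what is proved, stated in full; the proofs are below) =====
def Claim_equal_measure_voices : Prop := ∀ (people_genders : List (String × String)) (nes_quotes : List (String × List (List (String × Int)))) (quotes_no_nes : List (List (String × Int))), Dom_measure_voices people_genders nes_quotes quotes_no_nes → Pre_measure_voices people_genders nes_quotes quotes_no_nes → Spec_measure_voices people_genders nes_quotes quotes_no_nes (measure_voices people_genders nes_quotes quotes_no_nes)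

-- ===== LEMMAS AND PROOFS =====

/-- A's fold, accumulating from an arbitrary start, equals the start shifted by
B's three staged sums (with unknowns as total minus female minus male). -/
lemma mv_main (people_genders : List (String × String))
    (nq : List (String × List (List (String × Int)))) (a b c : Int) :
    nq.foldl (fun (s : Int × Int × Int) pq =>
      let gender := ((PySem.Dict.mk people_genders).get? pq.1).getD ""
      let t := pq.2.foldl (fun acc q => acc + ((PySem.Dict.mk q).get? "quote_token_count").getD 0) 0
      if gender = "female" then (s.1 + t, s.2.1, s.2.2)
      else if gender = "male" then (s.1, s.2.1 + t, s.2.2)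
      else (s.1, s.2.1, s.2.2 + t)) (a, b, c)
    = (let gender := fun p => ((PySem.Dict.mk people_genders).get? p).getD ""
       let f := ((nq.filter (fun pq => gender pq.1 == "female")).map (fun pq => mvSize pq.2)).sum
       let m := ((nq.filter (fun pq => gender pq.1 == "male")).map (fun pq => mvSize pq.2)).sum
       let t := (nq.map (fun pq => mvSize pq.2)).sum
       (a + f, b + m, c + (t - f - m))) := by
  induction nq generalizing a b c with
  | nil => simp
  | cons pq r ih =>
    have hsum : pq.2.foldl (fun acc q => acc + ((PySem.Dict.mk q).get? "quote_token_count").getD 0) 0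
        = mvSize pq.2 := by
      rw [PySem.List.foldl_add]; simp [mvSize]
    simp only [List.foldl_cons, hsum]
    by_cases h1 : ((PySem.Dict.mk people_genders).get? pq.1).getD "" = "female"
    · rw [if_pos h1, ih]
      simp only [List.filter_cons, List.map_cons, List.sum_cons, beq_iff_eq, h1,
        String.reduceEq, if_true, if_false, Prod.mk.injEq]
      and_intros <;> first | ring | rfl | trivial
    · rw [if_neg h1]
      by_cases h2 : ((PySem.Dict.mk people_genders).get? pq.1).getD "" = "male"
      · rw [if_pos h2, ih]
        simp only [List.filter_cons, List.map_cons, List.sum_cons, beq_iff_eq, h2,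
          String.reduceEq, if_true, if_false, Prod.mk.injEq]
        and_intros <;> first | ring | rfl | trivial
      · rw [if_neg h2, ih]
        simp only [List.filter_cons, List.map_cons, List.sum_cons, beq_iff_eq, h1, h2,
          if_false, Prod.mk.injEq]
        and_intros <;> first | ring | rfl | trivial

-- ===== VERDICT (by name: the statement is the Claim_ definition above) =====
theorem measure_voices_spec : Claim_equal_measure_voices := by
  intro people_genders nes_quotes quotes_no_nes _ _
  unfold Spec_measure_voices measure_voices measure_voices_alt
  rw [mv_main]
  norm_num
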